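-- pv_equiv track=rewrite | github.com/First-Non-Interesting-Username/calculatorWithoutInt | math_without_integers/zero_to_nine.py | compare_smaller
-- ===== SOURCE A (Python) =====
-- def error(message):
--     raise Exception(message)
--
-- def substract_one(number):
--     if number == "0":
--         error("The code was trying to substract something from 0. You submited wrong numbers")
--     elif number == "1":
--         return "0"
--     elif number == "2":
--         return "1"
--     elif number == "3":
--         return "2"
--     elif number == "4":
--         return "3"
--     elif number == "5":
--         return "4"
--     elif number == "6":
--         return "5"
--     elif number == "7":
--         return "6"
--     elif number == "8":
--         return "7"
--     elif number == "9":
--         return "8"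
--
-- def compare_smaller(n1, n2):
--     original_n1 = n1
--     original_n2 = n2
--     while n1 != "0" and n2 != "0":
--         n1 = substract_one(n1)
--         n2 = substract_one(n2)
--     if n1 == "0":
--         return original_n1
--     else:
--         return original_n2
-- ===== SOURCE B (Python) =====
-- def compare_smaller(n1, n2):
--     digits = ["0", "1", "2", "3", "4", "5", "6", "7", "8", "9"]
--     if n1 not in digits:
--         return n2
--     if n2 not in digits:
--         return n1
--     return n1 if digits.index(n1) <= digits.index(n2) else n2
-- ===== Notes on version B (the rewrite author's own statement) =====
-- stated objective: simpler
-- what changed: Replaces the paired decrement loop and its ten-branch substract_one helper with a digit-table membership test plus index comparison; a non-digit operand (which can never reach '0') is treated as the larger one, which is exactly what A returns on mixed inputs.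
import Mathlib
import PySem

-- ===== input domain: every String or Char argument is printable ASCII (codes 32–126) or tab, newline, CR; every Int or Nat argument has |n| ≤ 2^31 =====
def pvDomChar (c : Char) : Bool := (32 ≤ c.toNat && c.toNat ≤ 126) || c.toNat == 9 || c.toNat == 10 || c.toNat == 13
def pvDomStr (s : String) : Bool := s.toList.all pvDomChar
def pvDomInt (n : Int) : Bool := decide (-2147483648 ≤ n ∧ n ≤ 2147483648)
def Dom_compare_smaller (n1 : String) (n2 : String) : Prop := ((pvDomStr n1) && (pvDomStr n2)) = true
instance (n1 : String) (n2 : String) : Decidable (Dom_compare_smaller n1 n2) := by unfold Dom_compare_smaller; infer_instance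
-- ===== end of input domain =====

-- B replaces the paired decrement loop by a digit-table membership test and index comparison (simpler); equal wherever A terminates (at least one operand a digit '0'..'9').


-- ===== PORT A =====
-- substract_one; the value is Option String: none models Python's falling through every branch and
-- returning None (the "0" branch raises in Python, but the loop guard makes it unreachable, so none there too)
def substract_one (number : Option String) : Option String :=
  if number = some "0" then none
  else if number = some "1" then some "0"
  else if number = some "2" then some "1"
  else if number = some "3" then some "2"
  else if number = some "4" then some "3"
  else if number = some "5" then some "4"
  else if number = some "6" then some "5"
  else if number = some "7" then some "6"
  else if number = some "8" then some "7"
  else if number = some "9" then some "8"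
  else none

-- the while loop; fuel 10 suffices whenever one operand is a digit (it reaches "0" in ≤ 9 steps);
-- otherwise Python loops forever (outside Pre_) and the port yields the unreachable none
def compare_smaller_loop : Nat → Option String → Option String → Option (Option String × Option String)
  | 0, _, _ => none
  | f + 1, n1, n2 =>
    if n1 ≠ some "0" ∧ n2 ≠ some "0" then
      compare_smaller_loop f (substract_one n1) (substract_one n2)
    else some (n1, n2)

def compare_smaller (n1 : String) (n2 : String) : String :=
  match compare_smaller_loop 10 (some n1) (some n2) with
  | some (v1, _) => if v1 = some "0" then n1 else n2
  | none => ""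

-- ===== PORT B =====
def pyDigits : List String := ["0", "1", "2", "3", "4", "5", "6", "7", "8", "9"]

def compare_smaller_alt (n1 : String) (n2 : String) : String :=
  if n1 ∉ pyDigits then n2
  else if n2 ∉ pyDigits then n1
  else if pyDigits.idxOf n1 ≤ pyDigits.idxOf n2 then n1 else n2

-- ===== PRECONDITION & SPEC =====
-- Pre_ excludes exactly the inputs where neither operand is a single digit '0'..'9': there nothing
-- ever reaches "0" and A's while loop never terminates (no return value).
def Pre_compare_smaller (n1 : String) (n2 : String) : Prop :=
  n1 ∈ (["0","1","2","3","4","5","6","7","8","9"] : List String) ∨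
  n2 ∈ (["0","1","2","3","4","5","6","7","8","9"] : List String)
instance (n1 : String) (n2 : String) : Decidable (Pre_compare_smaller n1 n2) := by unfold Pre_compare_smaller; infer_instance

def pvWitness_compare_smaller : String × String := ("3", "7")

def Spec_compare_smaller (n1 : String) (n2 : String) (out : String) : Prop := out = compare_smaller_alt n1 n2
instance (n1 : String) (n2 : String) (out : String) : Decidable (Spec_compare_smaller n1 n2 out) := by unfold Spec_compare_smaller; infer_instance

-- ===== CLAIM (what is proved, stated in full; the proofs are below) =====
def Claim_equal_compare_smaller : Prop := ∀ (n1 : String) (n2 : String), Dom_compare_smaller n1 n2 → Pre_compare_smaller n1 n2 → Spec_compare_smaller n1 n2 (compare_smaller n1 n2)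

-- ===== LEMMAS AND PROOFS =====
-- dstr i = the digit string for i (for i ≤ 9); proof-side view of the digit table
def dstr (i : Nat) : String := pyDigits.getD i ""

lemma dstr_zero : dstr 0 = "0" := rfl

lemma dstr_eq_zero_iff (i : Nat) (h : i < 10) : dstr i = "0" ↔ i = 0 := by
  interval_cases i <;> simp [dstr, pyDigits]

lemma sub1_dstr (i : Nat) (h : i < 9) :
    substract_one (some (dstr (i + 1))) = some (dstr i) := by
  interval_cases i <;> simp [dstr, pyDigits, substract_one]

lemma sub1_none : substract_one none = none := rfl

lemma sub1_nondigit (n : String)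
    (h : n ∉ (["0","1","2","3","4","5","6","7","8","9"] : List String)) :
    substract_one (some n) = none := by
  simp only [List.mem_cons, List.not_mem_nil, or_false, not_or] at h
  obtain ⟨h0, h1, h2, h3, h4, h5, h6, h7, h8, h9⟩ := h
  simp [substract_one, h0, h1, h2, h3, h4, h5, h6, h7, h8, h9]

lemma mem_dstr (i : Nat) (h : i < 10) : dstr i ∈ pyDigits := by
  interval_cases i <;> simp [dstr, pyDigits]

lemma idx_dstr (i : Nat) (h : i < 10) : pyDigits.idxOf (dstr i) = i := by
  interval_cases i <;> simp [dstr, pyDigits]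

lemma dstr_surj (n : String)
    (h : n ∈ (["0","1","2","3","4","5","6","7","8","9"] : List String)) :
    ∃ i, i < 10 ∧ dstr i = n := by
  obtain ⟨i, hi, hget⟩ := List.mem_iff_getElem.mp h
  refine ⟨i, by simpa using hi, ?_⟩
  rw [dstr, List.getD_eq_getElem _ _ (by simpa [pyDigits] using hi)]
  exact hget

lemma loop_digits (i : Nat) : ∀ (j f : Nat), i < 10 → j < 10 → min i j < f →
    compare_smaller_loop f (some (dstr i)) (some (dstr j)) =
      some (some (dstr (i - min i j)), some (dstr (j - min i j))) := by
  induction i with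
  | zero =>
    intro j f _ _ hf
    obtain ⟨f', rfl⟩ : ∃ f', f = f' + 1 := ⟨f - 1, by omega⟩
    rw [compare_smaller_loop, if_neg (by simp [dstr_zero])]
    simp
  | succ i ih =>
    intro j f hi hj hf
    cases j with
    | zero =>
      obtain ⟨f', rfl⟩ : ∃ f', f = f' + 1 := ⟨f - 1, by omega⟩
      rw [compare_smaller_loop, if_neg (by simp [dstr_zero])]
      simp
    | succ j =>
      obtain ⟨f', rfl⟩ : ∃ f', f = f' + 1 := ⟨f - 1, by omega⟩
      rw [compare_smaller_loop,
        if_pos ⟨by simp [dstr_eq_zero_iff (i+1) hi], by simp [dstr_eq_zero_iff (j+1) hj]⟩,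
        sub1_dstr i (by omega), sub1_dstr j (by omega),
        ih j f' (by omega) (by omega) (by omega)]
      have e1 : i - min i j = i + 1 - min (i + 1) (j + 1) := by omega
      have e2 : j - min i j = j + 1 - min (i + 1) (j + 1) := by omega
      rw [e1, e2]

lemma loop_right_none (i : Nat) : ∀ (f : Nat) (x : Option String), i < 10 → i < f →
    x ≠ some "0" → substract_one x = none →
    ∃ y, compare_smaller_loop f (some (dstr i)) x = some (some "0", y) := by
  induction i with
  | zero =>
    intro f x _ hf _ _
    obtain ⟨f', rfl⟩ : ∃ f', f = f' + 1 := ⟨f - 1, by omega⟩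
    exact ⟨x, by rw [compare_smaller_loop, if_neg (by simp [dstr_zero])]; simp [dstr_zero]⟩
  | succ i ih =>
    intro f x hi hf hx hsx
    obtain ⟨f', rfl⟩ : ∃ f', f = f' + 1 := ⟨f - 1, by omega⟩
    rw [compare_smaller_loop,
      if_pos ⟨by simp [dstr_eq_zero_iff (i+1) hi], hx⟩,
      sub1_dstr i (by omega), hsx]
    exact ih f' none (by omega) (by omega) (by simp) sub1_none

lemma loop_left_none (j : Nat) : ∀ (f : Nat) (x : Option String), j < 10 → j < f →
    x ≠ some "0" → substract_one x = none →
    ∃ y, compare_smaller_loop f x (some (dstr j)) = some (y, some "0") ∧ y ≠ some "0" := by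
  induction j with
  | zero =>
    intro f x _ hf hx _
    obtain ⟨f', rfl⟩ : ∃ f', f = f' + 1 := ⟨f - 1, by omega⟩
    refine ⟨x, ?_, hx⟩
    rw [compare_smaller_loop, if_neg (by simp [dstr_zero])]
    simp [dstr_zero]
  | succ j ih =>
    intro f x hj hf hx hsx
    obtain ⟨f', rfl⟩ : ∃ f', f = f' + 1 := ⟨f - 1, by omega⟩
    rw [compare_smaller_loop,
      if_pos ⟨hx, by simp [dstr_eq_zero_iff (j+1) hj]⟩,
      hsx, sub1_dstr j (by omega)]
    exact ih f' none (by omega) (by omega) (by simp) sub1_none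

-- B on a pair of digits, via the index lemmas
lemma alt_digits (i j : Nat) (hi : i < 10) (hj : j < 10) :
    compare_smaller_alt (dstr i) (dstr j) = if i ≤ j then dstr i else dstr j := by
  rw [compare_smaller_alt, if_neg (by simp [mem_dstr i hi]),
    if_neg (by simp [mem_dstr j hj]), idx_dstr i hi, idx_dstr j hj]

-- ===== VERDICT (by name: the statement is the Claim_ definition above) =====
theorem compare_smaller_spec : Claim_equal_compare_smaller := by
  intro n1 n2 _ hpre
  unfold Spec_compare_smaller
  by_cases h1 : n1 ∈ (["0","1","2","3","4","5","6","7","8","9"] : List String) <;>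
    by_cases h2 : n2 ∈ (["0","1","2","3","4","5","6","7","8","9"] : List String)
  · obtain ⟨i, hi, rfl⟩ := dstr_surj n1 h1
    obtain ⟨j, hj, rfl⟩ := dstr_surj n2 h2
    rw [compare_smaller, loop_digits i j 10 hi hj (by omega), alt_digits i j hi hj]
    by_cases hij : i ≤ j
    · rw [if_pos hij]
      have e : i - min i j = 0 := by omega
      simp [e, dstr_zero]
    · rw [if_neg hij]
      have e : dstr (i - min i j) ≠ "0" := by
        intro hc; have := (dstr_eq_zero_iff _ (by omega)).mp hc; omega
      simp [e]
  · -- n1 is a digit, n2 is not: A's loop drives n1 to "0" and returns n1; B returns n1 too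
    obtain ⟨i, hi, rfl⟩ := dstr_surj n1 h1
    have hn2 : some n2 ≠ some "0" := by simp; intro hc; exact h2 (by simp [hc])
    obtain ⟨y, hy⟩ := loop_right_none i 10 (some n2) hi (by omega) hn2 (sub1_nondigit n2 h2)
    rw [compare_smaller, hy]
    dsimp only
    rw [if_pos rfl, compare_smaller_alt, if_neg (by simp [mem_dstr i hi]), if_pos (by simpa [pyDigits] using h2)]
  · -- n2 is a digit, n1 is not: A's loop ends when n2 hits "0" and returns n2; B returns n2 too
    obtain ⟨j, hj, rfl⟩ := dstr_surj n2 h2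
    have hn1 : some n1 ≠ some "0" := by simp; intro hc; exact h1 (by simp [hc])
    obtain ⟨y, hy, hyne⟩ := loop_left_none j 10 (some n1) hj (by omega) hn1 (sub1_nondigit n1 h1)
    rw [compare_smaller, hy]
    dsimp only
    rw [if_neg (by simpa using hyne), compare_smaller_alt, if_pos (by simpa [pyDigits] using h1)]
  · exact absurd hpre (by simp [Pre_compare_smaller, h1, h2])
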